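-- pv_equiv track=rewrite | github.com/VTozo/Sistemas-Ciber-Fisicos | Conversor_base_n.py | conversor_base_n
-- ===== SOURCE A (Python) =====
-- letras = {
--   'a': 10,
--   'b': 11,
--   'c': 12,
--   'd': 13,
--   'e': 14,
--   'f': 15,
--   'g': 16,
--   'h': 17,
--   'i': 18,
--   'j': 19,
--   'k': 20,
--   'l': 21,
--   'm': 22,
--   'n': 23,
--   'o': 24,
--   'p': 25,
--   'q': 26,
--   'r': 27,
--   's': 28,
--   't': 29,
--   'u': 30,
--   'v': 31,
--   'w': 32,
--   'x': 33,
--   'y': 34,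
--   'z': 35
-- }
--
-- def conversor_base_n(valor, base):
--     posicao = 0
--     resultado = 0
--     for digito in reversed(valor):
--         if not digito.isdigit():
--             digito = letras[digito.lower()]
--
--         resultado += int(digito)*base**posicao
--         posicao += 1
--
--     return 'Valor na base decimal: '+str(resultado)
-- ===== SOURCE B (Python) =====
-- def conversor_base_n(valor, base):
--     # Horner's method, left to right: one pass, no exponentiation.
--     resultado = 0
--     for c in valor:
--         if c.isdigit():
--             d = ord(c) - 48
--         else:
--             d = ord(c.lower()) - 87
--         resultado = resultado * base + d
--     return 'Valor na base decimal: ' + str(resultado)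
-- ===== Notes on version B (the rewrite author's own statement) =====
-- stated objective: faster
-- what changed: Replaces the reversed right-to-left loop with per-position exponentiation (base**posicao) and dict lookups by a single left-to-right Horner pass (resultado = resultado*base + digit) with arithmetic digit values.
import Mathlib
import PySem

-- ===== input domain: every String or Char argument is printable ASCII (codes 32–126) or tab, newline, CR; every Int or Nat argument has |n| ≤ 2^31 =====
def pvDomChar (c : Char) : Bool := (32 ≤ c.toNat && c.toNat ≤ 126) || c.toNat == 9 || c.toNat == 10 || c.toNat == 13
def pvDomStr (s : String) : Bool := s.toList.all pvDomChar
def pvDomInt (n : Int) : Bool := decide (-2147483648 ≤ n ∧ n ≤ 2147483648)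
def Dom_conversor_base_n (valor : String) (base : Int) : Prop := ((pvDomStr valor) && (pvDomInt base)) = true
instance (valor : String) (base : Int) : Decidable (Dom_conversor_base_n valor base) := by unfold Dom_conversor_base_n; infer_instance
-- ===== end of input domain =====

-- B replaces A's reversed loop with base**posicao per digit by a single left-to-right Horner pass (measured faster).

-- ===== PORT A =====
-- A: reversed loop, digit value via int()/letras dict, resultado += digit * base**posicao.
-- (letras as a Char-keyed dict; single-char int() via PySem.Int.ofChars?; KeyError → excluded by Pre_.)
def letrasA : PySem.Dict Char Int := PySem.Dict.ofList
  [('a',10),('b',11),('c',12),('d',13),('e',14),('f',15),('g',16),('h',17),('i',18),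
   ('j',19),('k',20),('l',21),('m',22),('n',23),('o',24),('p',25),('q',26),('r',27),
   ('s',28),('t',29),('u',30),('v',31),('w',32),('x',33),('y',34),('z',35)]

def convAGo (base : Int) : List Char → Int → Nat → Int
  | [], resultado, _ => resultado
  | c :: rest, resultado, posicao =>
      let d : Int :=
        if ¬ PySem.Chars.isdigit c then (letrasA.get? (PySem.Chars.lowerChar c)).getD 0
        else (PySem.Int.ofChars? [c]).getD 0
      convAGo base rest (resultado + d * base ^ posicao) (posicao + 1)

def conversor_base_n (valor : String) (base : Int) : String :=
  "Valor na base decimal: " ++ PySem.Int.toStr (convAGo base valor.toList.reverse 0 0)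

-- ===== PORT B =====
-- B: one left-to-right Horner pass.
def digB (c : Char) : Int :=
  if PySem.Chars.isdigit c then (c.toNat : Int) - 48
  else ((PySem.Chars.lowerChar c).toNat : Int) - 87

def conversor_base_n_alt (valor : String) (base : Int) : String :=
  "Valor na base decimal: " ++
    PySem.Int.toStr (valor.toList.foldl (fun resultado c => resultado * base + digB c) 0)

-- ===== PRECONDITION & SPEC =====
-- Pre_: every character is an ASCII digit or ASCII letter; on any other character A raises KeyError.
def okCharB (c : Char) : Bool :=
  (48 ≤ c.toNat && c.toNat ≤ 57) || (97 ≤ c.toNat && c.toNat ≤ 122) || (65 ≤ c.toNat && c.toNat ≤ 90)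

def Pre_conversor_base_n (valor : String) (_base : Int) : Prop :=
  valor.toList.all okCharB = true
instance (valor : String) (base : Int) : Decidable (Pre_conversor_base_n valor base) := by unfold Pre_conversor_base_n; infer_instance
def pvWitness_conversor_base_n : String × Int := ("fF10z", 36)

def Spec_conversor_base_n (valor : String) (base : Int) (out : String) : Prop := out = conversor_base_n_alt valor base
instance (valor : String) (base : Int) (out : String) : Decidable (Spec_conversor_base_n valor base out) := by unfold Spec_conversor_base_n; infer_instance

-- ===== CLAIM =====
def Claim_equal_conversor_base_n : Prop := ∀ (valor : String) (base : Int), Dom_conversor_base_n valor base → Pre_conversor_base_n valor base → Spec_conversor_base_n valor base (conversor_base_n valor base)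
-- ===== LEMMAS AND PROOFS =====

-- A's digit value for an admitted character.
def digA (c : Char) : Int :=
  if ¬ PySem.Chars.isdigit c then (letrasA.get? (PySem.Chars.lowerChar c)).getD 0
  else (PySem.Int.ofChars? [c]).getD 0

set_option maxRecDepth 4000 in
theorem digA_eq_digB_ofNat : ∀ n ∈ List.range 123,
    ((48 ≤ n ∧ n ≤ 57) ∨ (97 ≤ n ∧ n ≤ 122) ∨ (65 ≤ n ∧ n ≤ 90)) →
    digA (Char.ofNat n) = digB (Char.ofNat n) := by decide

theorem digA_eq_digB (c : Char) (h : okCharB c = true) : digA c = digB c := by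
  have hb : (48 ≤ c.toNat ∧ c.toNat ≤ 57) ∨ (97 ≤ c.toNat ∧ c.toNat ≤ 122) ∨ (65 ≤ c.toNat ∧ c.toNat ≤ 90) := by
    simp only [okCharB, Bool.or_eq_true, Bool.and_eq_true, decide_eq_true_eq] at h
    tauto
  have := digA_eq_digB_ofNat c.toNat (by simp only [List.mem_range]; omega) hb
  rwa [Char.ofNat_toNat] at this

-- N l = value of l read little-endian (head = least significant digit, under digA).
def NvalA (base : Int) : List Char → Int
  | [] => 0
  | c :: t => digA c + base * NvalA base t

theorem convAGo_eq (base : Int) (l : List Char) (res : Int) (pos : Nat) :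
    convAGo base l res pos = res + base ^ pos * NvalA base l := by
  induction l generalizing res pos with
  | nil => simp [convAGo, NvalA]
  | cons c t ih =>
      simp only [convAGo, NvalA]
      rw [ih]
      show res + digA c * base ^ pos + base ^ (pos + 1) * NvalA base t = _
      ring

theorem NvalA_append (base : Int) (xs : List Char) (c : Char) :
    NvalA base (xs ++ [c]) = NvalA base xs + digA c * base ^ xs.length := by
  induction xs with
  | nil => simp [NvalA]
  | cons x t ih => simp [NvalA, ih, List.length_cons]; ring

theorem horner_eq (base : Int) (l : List Char) (h : ∀ c ∈ l, okCharB c = true) (a : Int) :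
    l.foldl (fun resultado c => resultado * base + digB c) a
      = a * base ^ l.length + NvalA base l.reverse := by
  induction l generalizing a with
  | nil => simp [NvalA]
  | cons c t ih =>
      simp only [List.foldl_cons, List.reverse_cons]
      rw [ih (fun x hx => h x (List.mem_cons_of_mem _ hx)),
          NvalA_append, List.length_reverse, List.length_cons,
          ← digA_eq_digB c (h c List.mem_cons_self)]
      ring

-- ===== VERDICT =====
theorem conversor_base_n_spec : Claim_equal_conversor_base_n := by
  intro valor base _ hpre
  show _ = _
  unfold conversor_base_n conversor_base_n_alt
  rw [horner_eq base valor.toList (List.all_eq_true.mp hpre) 0, convAGo_eq]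
  simp
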